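-- pv_equiv track=rewrite | github.com/pypi-data/pypi-code-7 | pathod/pathod-0.11.tar.gz/netlib/certutils.py | asterisk_forms
-- ===== SOURCE A (Python) =====
-- def asterisk_forms(dn):
--     parts = dn.split(".")
--     parts.reverse()
--     curr_dn = ""
--     dn_forms = ["*"]
--     for part in parts[:-1]:
--         curr_dn = "." + part + curr_dn  # .example.com
--         dn_forms.append("*" + curr_dn)   # *.example.com
--     if parts[-1] != "*":
--         dn_forms.append(parts[-1] + curr_dn)
--     return dn_forms
-- ===== SOURCE B (Python) =====
-- def asterisk_forms(dn):
--     parts = dn.split(".")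
--     forms = ["*"]
--     for i in range(len(parts) - 1, 0, -1):
--         forms.append("*." + ".".join(parts[i:]))
--     if parts[0] != "*":
--         forms.append(".".join(parts))
--     return forms
-- ===== Notes on version B (the rewrite author's own statement) =====
-- stated objective: simpler
-- what changed: Replaced A's reversed-parts iteration with a mutating curr_dn accumulator string by a direct descending-index loop that recomputes each wildcard suffix by joining parts[i:] on the dot separator, appending the joined whole parts list (equal to dn) at the end.
import Mathlib
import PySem

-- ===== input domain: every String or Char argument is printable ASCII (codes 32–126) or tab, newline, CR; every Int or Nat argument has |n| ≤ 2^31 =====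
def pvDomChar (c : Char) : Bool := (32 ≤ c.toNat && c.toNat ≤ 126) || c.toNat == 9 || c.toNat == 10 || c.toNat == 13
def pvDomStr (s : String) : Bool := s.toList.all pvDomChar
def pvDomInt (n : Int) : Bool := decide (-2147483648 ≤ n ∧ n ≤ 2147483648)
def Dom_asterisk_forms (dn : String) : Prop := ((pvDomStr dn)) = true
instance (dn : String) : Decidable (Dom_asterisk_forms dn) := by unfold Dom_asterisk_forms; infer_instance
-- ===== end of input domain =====

-- B replaces A's reversed iteration with a mutating accumulator string by a direct
-- descending-index loop that recomputes each wildcard suffix with '.'.join (objective: simpler).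

-- ===== PORT A =====
-- literal transliteration of A: split, reverse, accumulate curr_dn while appending forms,
-- then append parts[-1] + curr_dn unless parts[-1] == "*".
-- Strings are handled as List Char via PySem.Chars (exact; '+' on str = List.append).
def asterisk_forms (dn : String) : List String :=
  let parts := (PySem.Chars.splitOn dn.toList ['.']).reverse
  let res := (PySem.List.slice parts none (some (-1))).foldl
    (fun (st : List Char × List (List Char)) part =>
      let curr := ['.'] ++ part ++ st.1
      (curr, st.2 ++ [['*'] ++ curr]))
    ([], [['*']])
  let forms :=
    if PySem.List.pyGetD parts (-1) [] ≠ ['*'] then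
      res.2 ++ [PySem.List.pyGetD parts (-1) [] ++ res.1]
    else res.2
  forms.map (fun cs => String.ofList cs)

-- ===== PORT B =====
-- literal transliteration of Source B: forms = ["*"]; for i in range(len(parts)-1, 0, -1):
-- forms.append("*." + ".".join(parts[i:])); if parts[0] != "*": forms.append(".".join(parts)).
def asterisk_forms_alt (dn : String) : List String :=
  let parts := PySem.Chars.splitOn dn.toList ['.']
  let forms := (PySem.List.pyRange (PySem.List.len parts - 1) 0 (-1)).foldl
    (fun forms i =>
      forms ++ [['*', '.'] ++ PySem.Chars.join ['.'] (PySem.List.slice parts (some i) none)])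
    [['*']]
  let forms :=
    if PySem.List.pyGetD parts 0 [] ≠ ['*'] then
      forms ++ [PySem.Chars.join ['.'] parts]
    else forms
  forms.map (fun cs => String.ofList cs)

-- ===== PRECONDITION & SPEC =====
def Spec_asterisk_forms (dn : String) (out : List String) : Prop := out = asterisk_forms_alt dn
instance (dn : String) (out : List String) : Decidable (Spec_asterisk_forms dn out) := by unfold Spec_asterisk_forms; infer_instance

-- ===== CLAIM (what is proved, stated in full; the proofs are below) =====
def Claim_equal_asterisk_forms : Prop := ∀ (dn : String), Dom_asterisk_forms dn → Spec_asterisk_forms dn (asterisk_forms dn)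

-- ===== LEMMAS AND PROOFS =====

-- the value of A's curr_dn accumulator after a run of the loop starting from ""
def revDot (l : List (List Char)) : List Char :=
  l.foldl (fun c a => '.' :: a ++ c) []

lemma foldl_prepend_shift (l : List (List Char)) : ∀ c : List Char,
    l.foldl (fun c a => '.' :: a ++ c) c = l.foldl (fun c a => '.' :: a ++ c) [] ++ c := by
  induction l with
  | nil => simp
  | cons a l ih =>
    intro c
    simp only [List.foldl_cons]
    rw [ih, ih ('.' :: a ++ [])]
    simp

lemma revDot_nil : revDot [] = [] := rfl

lemma revDot_cons (a : List Char) (l : List (List Char)) :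
    revDot (a :: l) = revDot l ++ '.' :: a := by
  simp only [revDot, List.foldl_cons]
  rw [foldl_prepend_shift]
  simp

-- A's loop in closed form
lemma loopA (l : List (List Char)) : ∀ (c : List Char) (acc : List (List Char)),
    l.foldl (fun (st : List Char × List (List Char)) part =>
        let curr := ['.'] ++ part ++ st.1
        (curr, st.2 ++ [['*'] ++ curr])) (c, acc)
      = (revDot l ++ c,
         acc ++ (List.range l.length).map
           (fun k => '*' :: (revDot (l.take (k + 1)) ++ c))) := by
  induction l with
  | nil => simp [revDot]
  | cons a l ih =>
    intro c acc
    simp only [List.foldl_cons]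
    rw [ih]
    refine Prod.ext ?_ ?_
    · simp [revDot_cons]
    · simp [List.range_succ_eq_map, List.map_map, Function.comp_def, revDot_cons,
        revDot_nil, List.take_succ_cons, List.append_assoc]

lemma join_append_singleton (xs : List (List Char)) (a : List Char) (h : xs ≠ []) :
    PySem.Chars.join ['.'] (xs ++ [a]) = PySem.Chars.join ['.'] xs ++ '.' :: a := by
  induction xs with
  | nil => simp at h
  | cons b xs ih =>
    cases xs with
    | nil => simp [PySem.Chars.join_cons_cons, PySem.Chars.join_singleton]
    | cons q rest =>
      have ih' := ih (by simp)
      simp only [List.cons_append] at ih' ⊢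
      rw [PySem.Chars.join_cons_cons, PySem.Chars.join_cons_cons, ih']
      simp

lemma revDot_eq_join (s : List (List Char)) (h : s ≠ []) :
    revDot s = '.' :: PySem.Chars.join ['.'] s.reverse := by
  induction s with
  | nil => simp at h
  | cons a s ih =>
    cases s with
    | nil => simp [revDot, PySem.Chars.join_singleton]
    | cons b s' =>
      rw [revDot_cons, ih (by simp)]
      conv_rhs => rw [List.reverse_cons]
      rw [join_append_singleton _ _ (by simp)]
      simp

lemma pyRange_down (m : ℕ) :
    PySem.List.pyRange (m : ℤ) 0 (-1) = (List.range m).map (fun j : ℕ => (m : ℤ) - (j : ℤ)) := by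
  cases m with
  | zero => simp [PySem.List.pyRange]
  | succ n =>
    simp only [PySem.List.pyRange]
    rw [if_neg (by norm_num), if_neg (by norm_num), if_pos (by positivity)]
    have hc : ((((n + 1 : ℕ) : ℤ) - 0 + -(-1) - 1) / -(-1)).toNat = n + 1 := by
      push_cast; omega
    rw [hc]
    refine List.map_congr_left fun j hj => ?_
    push_cast
    ring

lemma take_rev_ne_nil (rest : List (List Char)) (j : ℕ) (hj : j < rest.length) :
    rest.reverse.take (j + 1) ≠ [] := by
  have hlen : (rest.reverse.take (j + 1)).length = min (j + 1) rest.length := by simp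
  intro h
  rw [h] at hlen
  simp at hlen
  omega

lemma last_eq (p : List Char) (rest : List (List Char)) :
    p ++ (revDot rest.reverse ++ []) = PySem.Chars.join ['.'] (p :: rest) := by
  cases rest with
  | nil => simp [revDot_nil, PySem.Chars.join_singleton]
  | cons r rest' =>
    rw [List.append_nil, revDot_eq_join _ (by simp), List.reverse_reverse,
      PySem.Chars.join_cons_cons]
    simp

lemma elem_eq (p : List Char) (rest : List (List Char)) (j : ℕ) (hj : j < rest.length) :
    '*' :: (revDot (rest.reverse.take (j + 1)) ++ []) =
      ['*', '.'] ++ PySem.Chars.join ['.']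
        (PySem.List.slice (p :: rest) (some (((rest.length : ℕ) : ℤ) - j)) none) := by
  have h1 : (0 : ℤ) ≤ ((rest.length : ℕ) : ℤ) - j := by omega
  rw [PySem.List.slice_from _ h1]
  have h2 : (((rest.length : ℕ) : ℤ) - j).toNat = rest.length - j := by omega
  rw [h2]
  have h3 : rest.length - j = (rest.length - j - 1) + 1 := by omega
  rw [h3, List.drop_succ_cons]
  have h4 : rest.drop (rest.length - j - 1) = (rest.reverse.take (j + 1)).reverse := by
    conv_lhs => rw [← List.reverse_reverse rest]
    rw [List.drop_reverse]
    congr 1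
    simp
    omega
  rw [h4, revDot_eq_join _ (take_rev_ne_nil rest j hj)]
  simp

-- ===== VERDICT (by name: the statement is the Claim_ definition above) =====
theorem asterisk_forms_spec : Claim_equal_asterisk_forms := by
  intro dn _
  unfold Spec_asterisk_forms asterisk_forms asterisk_forms_alt
  simp only []
  generalize PySem.Chars.splitOn dn.toList ['.'] = ps
  cases ps with
  | nil => rfl
  | cons p rest =>
    refine congrArg _ ?_
    rw [List.reverse_cons, PySem.List.slice_to_neg_one, List.dropLast_concat,
      PySem.List.pyGetD_neg_one_append_singleton, PySem.List.pyGetD_zero_cons,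
      loopA, PySem.List.foldl_append_singleton_eq_map, PySem.List.len_eq,
      show (((p :: rest).length : ℤ) - 1) = ((rest.length : ℕ) : ℤ) by
        push_cast [List.length_cons]; ring,
      pyRange_down, List.map_map]
    have hmap : (List.range rest.reverse.length).map
          (fun k => '*' :: (revDot (rest.reverse.take (k + 1)) ++ ([] : List Char)))
        = (List.range rest.length).map
          ((fun i => ['*', '.'] ++ PySem.Chars.join ['.']
              (PySem.List.slice (p :: rest) (some i) none)) ∘
            (fun j : ℕ => ((rest.length : ℕ) : ℤ) - j)) := by
      rw [List.length_reverse]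
      refine List.map_congr_left fun j hj => ?_
      exact elem_eq p rest j (List.mem_range.mp hj)
    rw [hmap]
    split_ifs with h
    · rw [List.append_assoc]
      refine congrArg _ (congrArg _ ?_)
      exact congrArg (fun x => [x]) (last_eq p rest)
    · rfl
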